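-- pv_equiv track=rewrite | github.com/AlbertoBocchieri/CPU-Only-RAG-with-Adaptive-Context-Budgeting | src/rag_cpu/data.py | map_doc_qrels_to_chunk_qrels
-- ===== SOURCE A (Python) =====
-- def map_doc_qrels_to_chunk_qrels(
--     doc_qrels: dict[str, dict[str, int]],
--     doc_to_chunks: dict[str, list[str]],
-- ) -> dict[str, dict[str, int]]:
--     out: dict[str, dict[str, int]] = {}
--     for qid, rel_docs in doc_qrels.items():
--         rel_chunks: dict[str, int] = {}
--         for doc_id, grade in rel_docs.items():
--             for chunk_id in doc_to_chunks.get(doc_id, []):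
--                 rel_chunks[chunk_id] = max(rel_chunks.get(chunk_id, 0), grade)
--         out[qid] = rel_chunks
--     return out
-- ===== SOURCE B (Python) =====
-- def map_doc_qrels_to_chunk_qrels(
--     doc_qrels: dict[str, dict[str, int]],
--     doc_to_chunks: dict[str, list[str]],
-- ) -> dict[str, dict[str, int]]:
--     out: dict[str, dict[str, int]] = {}
--     for qid, rel_docs in doc_qrels.items():
--         # pass 1: flatten to (chunk_id, grade) pairs, then group grades per chunk
--         pairs = [(chunk_id, grade)
--                  for doc_id, grade in rel_docs.items()
--                  for chunk_id in doc_to_chunks.get(doc_id, [])]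
--         chunk_grades: dict[str, list[int]] = {}
--         for chunk_id, grade in pairs:
--             chunk_grades.setdefault(chunk_id, []).append(grade)
--         # pass 2: reduce each grade list, seeded with 0 (A's get(..., 0) floor)
--         out[qid] = {c: max(0, *gs) for c, gs in chunk_grades.items()}
--     return out
-- ===== Notes on version B (the rewrite author's own statement) =====
-- stated objective: alternative
-- what changed: Instead of fusing the max-reduction into the nested doc/chunk loop, B first flattens each query's relevant docs into a (chunk_id, grade) pair list, groups the grades per chunk in one dict-building pass, and then reduces each grade list with max seeded by 0 in a separate comprehension pass.
import Mathlib
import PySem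

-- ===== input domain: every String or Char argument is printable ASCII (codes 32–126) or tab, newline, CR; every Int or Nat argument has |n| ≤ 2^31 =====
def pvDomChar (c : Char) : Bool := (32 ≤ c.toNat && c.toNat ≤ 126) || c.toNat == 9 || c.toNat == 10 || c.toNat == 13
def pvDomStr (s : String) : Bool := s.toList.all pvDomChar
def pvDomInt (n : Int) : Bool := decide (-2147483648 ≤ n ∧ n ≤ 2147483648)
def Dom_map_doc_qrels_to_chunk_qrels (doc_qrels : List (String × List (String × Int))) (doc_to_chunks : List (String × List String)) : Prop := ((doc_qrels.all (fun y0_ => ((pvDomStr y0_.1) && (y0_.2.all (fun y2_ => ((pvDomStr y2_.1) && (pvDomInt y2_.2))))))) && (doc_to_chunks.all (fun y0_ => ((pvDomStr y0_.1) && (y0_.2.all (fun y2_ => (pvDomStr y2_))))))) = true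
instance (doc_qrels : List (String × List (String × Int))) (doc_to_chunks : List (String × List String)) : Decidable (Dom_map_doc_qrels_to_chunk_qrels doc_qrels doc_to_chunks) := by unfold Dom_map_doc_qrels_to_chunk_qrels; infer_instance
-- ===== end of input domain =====

-- ===== PORT A =====
-- B builds per-qid grade lists in one grouping pass and reduces them in a second pass
-- (alternative decomposition, same cost); A fuses the max into the grouping loop.
def map_doc_qrels_to_chunk_qrels (doc_qrels : List (String × List (String × Int))) (doc_to_chunks : List (String × List String)) : List (String × List (String × Int)) :=
  (doc_qrels.foldl (fun out q =>
      out.insert q.1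
        ((q.2.foldl (fun rel dg =>
            (((PySem.Dict.mk doc_to_chunks).getD dg.1 []).foldl (fun rel c =>
                rel.insert c (max (rel.getD c 0) dg.2)) rel))
          (PySem.Dict.empty : PySem.Dict String Int)).items))
    (PySem.Dict.empty : PySem.Dict String (List (String × Int)))).items

-- ===== PORT B =====
-- max(0, *gs) = fold max seeded with 0
def pvMaxZ (gs : List Int) : Int := gs.foldl max 0

def map_doc_qrels_to_chunk_qrels_alt (doc_qrels : List (String × List (String × Int))) (doc_to_chunks : List (String × List String)) : List (String × List (String × Int)) :=
  (doc_qrels.foldl (fun out q =>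
      let pairs := q.2.flatMap (fun dg =>
        ((PySem.Dict.mk doc_to_chunks).getD dg.1 []).map (fun c => (c, dg.2)))
      -- chunk_grades.setdefault(c, []).append(g)  ==  modify c [] (· ++ [g])
      let gd := pairs.foldl (fun d p => d.modify p.1 [] (· ++ [p.2]))
        (PySem.Dict.empty : PySem.Dict String (List Int))
      out.insert q.1
        ((gd.items.foldl (fun d p => d.insert p.1 (pvMaxZ p.2))
          (PySem.Dict.empty : PySem.Dict String Int)).items))
    (PySem.Dict.empty : PySem.Dict String (List (String × Int)))).items

-- ===== PRECONDITION & SPEC =====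
def Spec_map_doc_qrels_to_chunk_qrels (doc_qrels : List (String × List (String × Int))) (doc_to_chunks : List (String × List String)) (out : List (String × List (String × Int))) : Prop := out = map_doc_qrels_to_chunk_qrels_alt doc_qrels doc_to_chunks
instance (doc_qrels : List (String × List (String × Int))) (doc_to_chunks : List (String × List String)) (out : List (String × List (String × Int))) : Decidable (Spec_map_doc_qrels_to_chunk_qrels doc_qrels doc_to_chunks out) := by unfold Spec_map_doc_qrels_to_chunk_qrels; infer_instance

-- ===== CLAIM (what is proved, stated in full; the proofs are below) =====
def Claim_equal_map_doc_qrels_to_chunk_qrels : Prop := ∀ (doc_qrels : List (String × List (String × Int))) (doc_to_chunks : List (String × List String)), Dom_map_doc_qrels_to_chunk_qrels doc_qrels doc_to_chunks → Spec_map_doc_qrels_to_chunk_qrels doc_qrels doc_to_chunks (map_doc_qrels_to_chunk_qrels doc_qrels doc_to_chunks)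

-- ===== LEMMAS AND PROOFS =====

-- a nested two-level fold is the fold over the flattened pair list
theorem foldl_nested_eq_flatMap {α β γ δ : Type} (step : δ → γ → δ) (g : α → List β) (h : α → β → γ) :
    ∀ (l : List α) (init : δ),
      l.foldl (fun d x => (g x).foldl (fun d c => step d (h x c)) d) init
        = (l.flatMap (fun x => (g x).map (h x))).foldl step init := by
  intro l
  induction l with
  | nil => intro init; rfl
  | cons a t ih =>
    intro init
    simp only [List.foldl_cons, List.flatMap_cons, List.foldl_append, List.foldl_map, ih]

theorem pvMaxZ_append (gs : List Int) (g : Int) : pvMaxZ (gs ++ [g]) = max (pvMaxZ gs) g := by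
  simp [pvMaxZ, List.foldl_append]

-- lookup in a dict whose items are value-mapped items of another dict
theorem get?_mapF (l : List (String × List Int)) (k : String) :
    (PySem.Dict.mk (l.map (fun p => (p.1, pvMaxZ p.2)))).get? k
      = Option.map pvMaxZ ((PySem.Dict.mk l).get? k) := by
  induction l with
  | nil => rfl
  | cons a t ih =>
    obtain ⟨k1, v1⟩ := a
    simp only [List.map_cons, PySem.Dict.get?_mk_cons]
    split <;> simp [ih]

-- invariant: the fused max-dict is the value-mapped grouped-lists dict, through any pair list
theorem grouped_invariant (pairs : List (String × Int)) :
    ∀ (dA : PySem.Dict String Int) (gd : PySem.Dict String (List Int)),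
      dA.items = gd.items.map (fun p => (p.1, pvMaxZ p.2)) →
      (pairs.foldl (fun d p => d.insert p.1 (max (d.getD p.1 0) p.2)) dA).items
        = (pairs.foldl (fun d p => d.modify p.1 [] (· ++ [p.2])) gd).items.map
            (fun p => (p.1, pvMaxZ p.2)) := by
  induction pairs with
  | nil => intro dA gd hrel; simpa using hrel
  | cons p t ih =>
    intro dA gd hrel
    simp only [List.foldl_cons]
    apply ih
    have hdA : dA = PySem.Dict.mk (gd.items.map (fun p => (p.1, pvMaxZ p.2))) :=
      PySem.Dict.ext hrel
    have hget : ∀ k, dA.get? k = Option.map pvMaxZ (gd.get? k) := by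
      intro k; rw [hdA, get?_mapF]
    have hcont : ∀ k, dA.contains k = gd.contains k := by
      intro k
      rw [PySem.Dict.contains_eq_isSome_get?, PySem.Dict.contains_eq_isSome_get?, hget,
        Option.isSome_map]
    have hgetD : dA.getD p.1 0 = pvMaxZ (gd.getD p.1 []) := by
      rw [PySem.Dict.getD_eq_get?_getD, PySem.Dict.getD_eq_get?_getD, hget]
      cases gd.get? p.1 with
      | none => rfl
      | some gs => rfl
    rw [PySem.Dict.modify, PySem.Dict.items_insert, PySem.Dict.items_insert, hcont p.1]
    by_cases hc : gd.contains p.1 = true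
    · simp only [hc, if_true, hrel, List.map_map]
      apply List.map_congr_left
      intro q _
      by_cases hk : (q.1 == p.1) = true
      · simp [Function.comp, hk, hgetD, pvMaxZ_append]
      · simp [Function.comp, hk]
    · simp only [hc, hrel]
      simp [hgetD, pvMaxZ_append]

-- the inner loops of A and B produce the same chunk dict (as an items list)
theorem inner_eq (doc_to_chunks : List (String × List String)) (rel_docs : List (String × Int)) :
    (rel_docs.foldl (fun rel dg =>
        (((PySem.Dict.mk doc_to_chunks).getD dg.1 []).foldl (fun rel c =>
            rel.insert c (max (rel.getD c 0) dg.2)) rel))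
      (PySem.Dict.empty : PySem.Dict String Int)).items
    = (let pairs := rel_docs.flatMap (fun dg =>
          ((PySem.Dict.mk doc_to_chunks).getD dg.1 []).map (fun c => (c, dg.2)))
       let gd := pairs.foldl (fun d p => d.modify p.1 [] (· ++ [p.2]))
          (PySem.Dict.empty : PySem.Dict String (List Int))
       (gd.items.foldl (fun d p => d.insert p.1 (pvMaxZ p.2))
          (PySem.Dict.empty : PySem.Dict String Int)).items) := by
  simp only []
  rw [foldl_nested_eq_flatMap
        (step := fun (d : PySem.Dict String Int) (q : String × Int) =>
          d.insert q.1 (max (d.getD q.1 0) q.2))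
        (g := fun dg : String × Int => (PySem.Dict.mk doc_to_chunks).getD dg.1 [])
        (h := fun (dg : String × Int) (c : String) => (c, dg.2))]
  set pairs := rel_docs.flatMap (fun dg =>
      ((PySem.Dict.mk doc_to_chunks).getD dg.1 []).map (fun c => (c, dg.2))) with hp
  set gd := pairs.foldl (fun d p => d.modify p.1 [] (· ++ [p.2]))
      (PySem.Dict.empty : PySem.Dict String (List Int)) with hgd
  have hnodup : (gd.items.map (·.1)).Nodup := by
    have := PySem.Dict.nodup_keys_foldl_modify_key pairs (fun p => p.1) []
      (fun _ p v => v ++ [p.2]) (PySem.Dict.empty : PySem.Dict String (List Int))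
      PySem.Dict.nodup_keys_empty
    simpa [PySem.Dict.keys, hgd] using this
  rw [PySem.Dict.items_foldl_insert_fresh gd.items (fun p => p.1) (fun p => pvMaxZ p.2)
      PySem.Dict.empty (fun a _ => PySem.Dict.contains_empty a.1) hnodup]
  have := grouped_invariant pairs PySem.Dict.empty PySem.Dict.empty rfl
  simpa using this

-- ===== VERDICT (by name: the statement is the Claim_ definition above) =====
theorem map_doc_qrels_to_chunk_qrels_spec : Claim_equal_map_doc_qrels_to_chunk_qrels := by
  intro dq dtc _
  unfold Spec_map_doc_qrels_to_chunk_qrels map_doc_qrels_to_chunk_qrels map_doc_qrels_to_chunk_qrels_alt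
  congr 1
  apply PySem.List.foldl_congr_mem
  intro acc q _
  rw [inner_eq]
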